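-- pv_equiv track=rewrite | github.com/cbility/YES | RHI_last_date_scraper.py | condense_list_with_indices
-- ===== SOURCE A (Python) =====
-- def condense_list_with_indices(lst):
--     condensed_lst = []
--     index_dict = {}
--
--     for i, item in enumerate(lst):
--         if item in index_dict:
--             index_dict[item].append(i)
--         else:
--             index_dict[item] = [i]
--
--     for item, indices in index_dict.items():
--         condensed_lst.append((item, indices))
--
--     return condensed_lst
-- ===== SOURCE B (Python) =====
-- def condense_list_with_indices(lst):
--     return [(item, [i for i, x in enumerate(lst) if x == item])
--             for item in dict.fromkeys(lst)]
-- ===== Notes on version B (the rewrite author's own statement) =====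
-- stated objective: idiomatic
-- what changed: Replaces the single-pass index-dict accumulation with a two-phase comprehension: dict.fromkeys gives the distinct items in first-occurrence order, then each item's index list is collected by a scan over enumerate(lst).
import Mathlib
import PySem

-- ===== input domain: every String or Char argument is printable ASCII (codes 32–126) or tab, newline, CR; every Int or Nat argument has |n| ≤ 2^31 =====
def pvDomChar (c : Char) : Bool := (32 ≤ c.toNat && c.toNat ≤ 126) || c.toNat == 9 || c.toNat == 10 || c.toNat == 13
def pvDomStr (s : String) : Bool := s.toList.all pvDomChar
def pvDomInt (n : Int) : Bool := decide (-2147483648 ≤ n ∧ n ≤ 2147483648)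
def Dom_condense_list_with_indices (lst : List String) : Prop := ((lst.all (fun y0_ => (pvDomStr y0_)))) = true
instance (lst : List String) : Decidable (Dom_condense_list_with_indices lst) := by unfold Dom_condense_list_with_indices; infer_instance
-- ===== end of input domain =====

-- B replaces the single-pass index-dict accumulation by a comprehension over the
-- first-occurrence-ordered distinct items, collecting each item's indices by a scan
-- of the enumerated list (idiomatic alternative; not faster).

-- ===== PORT A =====
def condense_list_with_indices (lst : List String) : List (String × List Int) :=
  let index_dict : PySem.Dict String (List Int) :=
    (PySem.List.enumerate lst).foldl
      (fun d p =>
        if d.contains p.2 then d.modify p.2 [] (fun v => v ++ [p.1])  -- index_dict[item].append(i)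
        else d.insert p.2 [p.1])                                      -- index_dict[item] = [i]
      PySem.Dict.empty
  index_dict.items.foldl (fun acc pr => acc ++ [pr]) []

-- ===== PORT B =====
def condense_list_with_indices_alt (lst : List String) : List (String × List Int) :=
  (PySem.List.dedup lst).map (fun item =>                             -- dict.fromkeys(lst)
    (item, ((PySem.List.enumerate lst).filter (fun p => p.2 == item)).map (·.1)))

-- ===== PRECONDITION & SPEC =====
def Spec_condense_list_with_indices (lst : List String) (out : List (String × List Int)) : Prop := out = condense_list_with_indices_alt lst
instance (lst : List String) (out : List (String × List Int)) : Decidable (Spec_condense_list_with_indices lst out) := by unfold Spec_condense_list_with_indices; infer_instance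

-- ===== CLAIM (what is proved, stated in full; the proofs are below) =====
def Claim_equal_condense_list_with_indices : Prop := ∀ (lst : List String), Dom_condense_list_with_indices lst → Spec_condense_list_with_indices lst (condense_list_with_indices lst)

-- ===== LEMMAS AND PROOFS =====

-- A's if/else update is the unconditional 'modify with default []' on every dict and pair.
theorem step_eq : (fun (d : PySem.Dict String (List Int)) (p : Int × String) =>
      if d.contains p.2 then d.modify p.2 [] (fun v => v ++ [p.1])
      else d.insert p.2 [p.1])
    = fun d p => d.modify p.2 [] (fun v => v ++ [p.1]) := by
  funext d p
  by_cases h : d.contains p.2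
  · simp [h]
  · simp only [Bool.not_eq_true] at h
    simp [h, PySem.Dict.modify, PySem.Dict.getD_of_not_contains _ _ h]

theorem condense_eq (lst : List String) :
    condense_list_with_indices lst = condense_list_with_indices_alt lst := by
  unfold condense_list_with_indices condense_list_with_indices_alt
  rw [step_eq, PySem.List.foldl_append_singleton_eq_self]
  set D := (PySem.List.enumerate lst).foldl
      (fun d (p : Int × String) => d.modify p.2 [] (fun v => v ++ [p.1])) PySem.Dict.empty with hD
  have hnd : D.keys.Nodup :=
    PySem.Dict.nodup_keys_foldl_modify_key (PySem.List.enumerate lst)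
      (fun p => p.2) [] (fun _ p v => v ++ [p.1]) PySem.Dict.empty (by simp)
  have hkeys : D.keys = PySem.List.dedup lst := by
    have hk := PySem.Dict.keys_foldl_modify_key (PySem.List.enumerate lst)
      (fun (p : Int × String) => p.2) [] (fun _ p v => v ++ [p.1]) PySem.Dict.empty
    rw [hD, hk]
    simp [PySem.List.map_snd_enumerate, PySem.List.dedup_eq_ofList]
    rfl
  have hgetD : ∀ c, D.getD c [] =
      ((PySem.List.enumerate lst).filter (fun p => p.2 == c)).map (·.1) := by
    intro c
    have hswap : D = ((PySem.List.enumerate lst).map Prod.swap).foldl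
        (fun d (p : String × Int) => d.modify p.1 [] (fun v => v ++ [p.2])) PySem.Dict.empty := by
      rw [hD, List.foldl_map]
      simp
    rw [hswap, PySem.Dict.getD_foldl_modify_append]
    simp [List.filter_map, List.map_map, Function.comp_def, Prod.swap]
  rw [PySem.Dict.items_eq_map_keys D hnd [], hkeys]
  apply List.map_congr_left
  intro k _
  rw [hgetD k]

-- ===== VERDICT (by name: the statement is the Claim_ definition above) =====
theorem condense_list_with_indices_spec : Claim_equal_condense_list_with_indices := by
  intro lst _
  exact condense_eq lst
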